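-- pv_equiv track=rewrite | github.com/ivandkoz/bioinformatics_starer_kit | bioinf_tools/bio_files_processor.py | find_names_for_queries
-- ===== SOURCE A (Python) =====
-- def find_names_for_queries(blast_result_file: list) -> dict:
--     """
--     Extracts protein names from a BLAST result file.
--
--     Args:
--         blast_result_file (list): List of lines from the BLAST result file.
--
--     Returns:
--         dict: List of protein names extracted from the BLAST result file.
--     """
--
--     desired_seq = 'Query #'
--     protein_list = []
--     for line in blast_result_file:
--         if desired_seq not in line:
--             continue
--         if desired_seq == 'Query #':
--             desired_seq = '>'
--             continue
--         if desired_seq == '>':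
--             if '>MULTISPECIES: ' in line:
--                 protein_name = line[15:line.find('[')-1]
--             else:
--                 protein_name = line[1:line.find('[')-1]
--             protein_list.append(protein_name)
--             desired_seq = 'Query #'
--     protein_list.sort()
--     return protein_list
-- ===== SOURCE B (Python) =====
-- def find_names_for_queries(blast_result_file: list) -> dict:
--     """Same extraction, written as two nested passes over one shared iterator."""
--     protein_list = []
--     it = iter(blast_result_file)
--     for line in it:
--         if 'Query #' not in line:
--             continue
--         for line2 in it:
--             if '>' not in line2:
--                 continue
--             if '>MULTISPECIES: ' in line2:
--                 protein_list.append(line2[15:line2.find('[') - 1])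
--             else:
--                 protein_list.append(line2[1:line2.find('[') - 1])
--             break
--     protein_list.sort()
--     return protein_list
-- ===== Notes on version B (the rewrite author's own statement) =====
-- stated objective: idiomatic
-- what changed: Replaced A's mode-string state machine (a sentinel 'desired_seq' toggled between 'Query #' and '>') by two nested loops over one shared iterator: the outer loop finds the next 'Query #' line, the inner loop consumes lines up to the next '>' line and parses its name.
import Mathlib
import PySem

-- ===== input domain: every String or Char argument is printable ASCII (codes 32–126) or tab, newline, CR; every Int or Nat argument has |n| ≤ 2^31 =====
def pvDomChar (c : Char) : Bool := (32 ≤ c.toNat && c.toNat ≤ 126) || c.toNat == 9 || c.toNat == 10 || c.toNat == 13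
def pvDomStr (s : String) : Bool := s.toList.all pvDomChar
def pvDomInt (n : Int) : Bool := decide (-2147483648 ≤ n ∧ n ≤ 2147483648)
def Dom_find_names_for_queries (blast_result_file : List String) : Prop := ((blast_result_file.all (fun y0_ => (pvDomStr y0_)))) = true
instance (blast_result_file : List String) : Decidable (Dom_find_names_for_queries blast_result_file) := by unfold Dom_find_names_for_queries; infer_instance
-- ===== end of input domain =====

-- B restructures A's mode-string state machine into two nested passes over one shared cursor (idiomatic decomposition; same cost).

-- ===== PORT A =====
-- A's loop body, folded over the lines with state (desired_seq, protein_list)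
def pvStepA (st : String × List String) (line : String) : String × List String :=
  if ¬ (PySem.Str.isIn st.1 line) then st
  else if st.1 == "Query #" then (">", st.2)
  else if st.1 == ">" then
    ("Query #", st.2 ++ [if PySem.Str.isIn ">MULTISPECIES: " line then
        PySem.Str.slice line (some 15) (some (PySem.Str.find line "[" - 1))
      else
        PySem.Str.slice line (some 1) (some (PySem.Str.find line "[" - 1))])
  else st

def find_names_for_queries (blast_result_file : List String) : List String :=
  PySem.List.sorted ((blast_result_file.foldl pvStepA ("Query #", [])).2) (fun x => x) false

-- ===== PORT B =====
-- B's name parsing of a '>' line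
def pvParseB (line : String) : String :=
  if PySem.Str.isIn ">MULTISPECIES: " line then
    PySem.Str.slice line (some 15) (some (PySem.Str.find line "[" - 1))
  else
    PySem.Str.slice line (some 1) (some (PySem.Str.find line "[" - 1))

mutual
-- outer pass: advance until a 'Query #' line, handing the rest to the inner pass
def pvOuterB : List String → List String
  | [] => []
  | l :: rest => if PySem.Str.isIn "Query #" l then pvInnerB rest else pvOuterB rest
-- inner pass: advance until a '>' line, emit its name, hand the rest back
def pvInnerB : List String → List String
  | [] => []
  | l :: rest => if PySem.Str.isIn ">" l then pvParseB l :: pvOuterB rest else pvInnerB rest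
end

def find_names_for_queries_alt (blast_result_file : List String) : List String :=
  PySem.List.sorted (pvOuterB blast_result_file) (fun x => x) false

-- ===== PRECONDITION & SPEC =====
def Spec_find_names_for_queries (blast_result_file : List String) (out : List String) : Prop := out = find_names_for_queries_alt blast_result_file
instance (blast_result_file : List String) (out : List String) : Decidable (Spec_find_names_for_queries blast_result_file out) := by unfold Spec_find_names_for_queries; infer_instance

-- ===== CLAIM (what is proved, stated in full; the proofs are below) =====
def Claim_equal_find_names_for_queries : Prop := ∀ (blast_result_file : List String), Dom_find_names_for_queries blast_result_file → Spec_find_names_for_queries blast_result_file (find_names_for_queries blast_result_file)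

-- ===== LEMMAS AND PROOFS =====
lemma pvFold_eq (xs : List String) : ∀ acc : List String,
    (xs.foldl pvStepA ("Query #", acc)).2 = acc ++ pvOuterB xs ∧
    (xs.foldl pvStepA (">", acc)).2 = acc ++ pvInnerB xs := by
  induction xs with
  | nil => intro acc; simp [pvOuterB, pvInnerB]
  | cons l rest ih =>
    intro acc
    refine ⟨?_, ?_⟩
    · simp only [List.foldl_cons, pvStepA, pvOuterB]
      by_cases h : PySem.Chars.isIn ['Q','u','e','r','y',' ','#'] l.toList
      · simp [h, (ih acc).2]
      · simp [h, (ih acc).1]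
    · simp only [List.foldl_cons, pvStepA, pvInnerB]
      by_cases h : PySem.Chars.isIn ['>'] l.toList
      · have hih := (ih (acc ++ [pvParseB l])).1
        simp [pvParseB] at hih
        simp [h, pvParseB, hih]
      · simp [h, (ih acc).2]

-- ===== VERDICT (by name: the statement is the Claim_ definition above) =====
theorem find_names_for_queries_spec : Claim_equal_find_names_for_queries := by
  intro xs _
  unfold Spec_find_names_for_queries find_names_for_queries find_names_for_queries_alt
  rw [(pvFold_eq xs []).1]
  simp
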